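-- pv_equiv track=rewrite | github.com/expertspec/expert | examples/cases/example_utils.py | place_words
-- ===== SOURCE A (Python) =====
-- def place_words(timestamps, empty):
--     stamp_starts = [t[0][0] for t in timestamps]
--     closest_idxs = [(99, 1)] * len(empty)
--     for i in range(len(empty)):
--         for j in range(len(stamp_starts)):
--             if (
--                 min(closest_idxs[i][0], abs(stamp_starts[j] - empty[i][1]))
--                 != closest_idxs[i][0]
--             ):
--                 closest_idxs[i] = (
--                     min(closest_idxs[i][0], abs(stamp_starts[j] - empty[i][1])),
--                     j,
--                 )
--     return closest_idxs
-- ===== SOURCE B (Python) =====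
-- def place_words(timestamps, empty):
--     # first occurrence index of each distinct stamp start
--     first = {}
--     for j in range(len(timestamps)):
--         s = timestamps[j][0][0]
--         if s not in first:
--             first[s] = j
--     vals = sorted(first)
--     if not vals:
--         return [(99, 1)] * len(empty)
--     n = len(vals)
--     res = []
--     for gap in empty:
--         q = gap[1]
--         lo, hi = 0, n
--         while lo < hi:
--             mid = (lo + hi) // 2
--             if vals[mid] < q:
--                 lo = mid + 1
--             else:
--                 hi = mid
--         cand = None
--         if lo < n:
--             cand = (vals[lo] - q, first[vals[lo]])
--         if lo > 0:
--             c2 = (q - vals[lo - 1], first[vals[lo - 1]])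
--             if cand is None or c2 < cand:
--                 cand = c2
--         if cand is not None and cand[0] < 99:
--             res.append(cand)
--         else:
--             res.append((99, 1))
--     return res
-- ===== Notes on version B (the rewrite author's own statement) =====
-- stated objective: faster
-- what changed: Replaces A's nested scan of all stamp starts per gap by a different algorithm: one pass builds a dict mapping each distinct start value to its first index, the distinct values are sorted once, and each gap does a hand-written binary search for the insertion point, comparing only the two neighbouring values (tie broken toward the smaller first index, cap 99 kept).
import Mathlib
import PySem

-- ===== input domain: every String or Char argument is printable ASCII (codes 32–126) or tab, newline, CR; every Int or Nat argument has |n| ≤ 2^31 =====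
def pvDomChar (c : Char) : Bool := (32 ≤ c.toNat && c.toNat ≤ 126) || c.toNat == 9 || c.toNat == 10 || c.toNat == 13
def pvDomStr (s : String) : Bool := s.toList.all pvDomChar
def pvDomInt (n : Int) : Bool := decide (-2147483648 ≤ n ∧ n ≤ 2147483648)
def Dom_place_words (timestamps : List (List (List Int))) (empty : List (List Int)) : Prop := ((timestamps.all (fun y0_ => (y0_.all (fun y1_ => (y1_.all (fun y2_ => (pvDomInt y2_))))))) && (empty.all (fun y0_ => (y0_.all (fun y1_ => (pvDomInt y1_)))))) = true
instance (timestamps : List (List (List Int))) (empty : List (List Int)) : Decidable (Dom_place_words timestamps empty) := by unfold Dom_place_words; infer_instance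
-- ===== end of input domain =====

-- B replaces A's O(E*S) nested scan by: one pass recording the first index of each distinct
-- stamp start in a dict, one sort of the distinct starts, and a binary search per gap
-- (nearest value is the sorted neighbour left or right of the insertion point).

-- ===== PORT A =====
def place_words (timestamps : List (List (List Int))) (empty : List (List Int)) : List (Int × Int) :=
  let stamp_starts := timestamps.map (fun t => PySem.List.pyGetD (PySem.List.pyGetD t 0 []) 0 0)
  (PySem.List.pyRange 0 (PySem.List.len empty) 1).foldl
    (fun closest i =>
      (PySem.List.pyRange 0 (PySem.List.len stamp_starts) 1).foldl
        (fun closest j =>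
          let cur := PySem.List.pyGetD closest i ((99 : Int), (1 : Int))
          let d := |PySem.List.pyGetD stamp_starts j 0 -
                    PySem.List.pyGetD (PySem.List.pyGetD empty i []) 1 0|
          if min cur.1 d ≠ cur.1 then PySem.List.pySetD closest i (min cur.1 d, j) else closest)
        closest)
    (List.replicate empty.length ((99 : Int), (1 : Int)))

-- ===== PORT B =====
-- the hand-written binary-search loop of Source B ('while lo < hi: …'), as a recursion on hi - lo
def bsearch (vals : List Int) (q : Int) (lo hi : Nat) : Nat :=
  if _h : lo < hi then
    let mid := (lo + hi) / 2
    if PySem.List.pyGetD vals (mid : Int) 0 < q then bsearch vals q (mid + 1) hi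
    else bsearch vals q lo mid
  else lo
termination_by hi - lo
decreasing_by all_goals omega

-- the body of Source B's 'for gap in empty' loop (first.getD v 0 is exact for Python's first[v]:
-- every looked-up v is a key of first, so the default is never taken)
def bestFor (vals : List Int) (first : PySem.Dict Int Int) (q : Int) : Int × Int :=
  let n := vals.length
  let lo := bsearch vals q 0 n
  let cand : Option (Int × Int) :=
    if lo < n then
      some (PySem.List.pyGetD vals (lo : Int) 0 - q, first.getD (PySem.List.pyGetD vals (lo : Int) 0) 0)
    else none
  let cand2 : Option (Int × Int) :=
    if 0 < lo then
      let c2 := (q - PySem.List.pyGetD vals ((lo : Int) - 1) 0,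
                 first.getD (PySem.List.pyGetD vals ((lo : Int) - 1) 0) 0)
      match cand with
      | none => some c2
      | some c => if c2.1 < c.1 ∨ (c2.1 = c.1 ∧ c2.2 < c.2) then some c2 else some c
    else cand
  match cand2 with
  | some c => if c.1 < 99 then c else ((99 : Int), (1 : Int))
  | none => ((99 : Int), (1 : Int))

def place_words_alt (timestamps : List (List (List Int))) (empty : List (List Int)) : List (Int × Int) :=
  let first := (PySem.List.pyRange 0 (PySem.List.len timestamps) 1).foldl
    (fun d j =>
      let s := PySem.List.pyGetD (PySem.List.pyGetD (PySem.List.pyGetD timestamps j []) 0 []) 0 0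
      if d.contains s then d else d.insert s j)
    PySem.Dict.empty
  let vals := PySem.List.sorted first.keys (fun x => x) false
  if vals.isEmpty then List.replicate empty.length ((99 : Int), (1 : Int))
  else empty.map (fun gap => bestFor vals first (PySem.List.pyGetD gap 1 0))

-- ===== PRECONDITION & SPEC =====
-- Pre_ excludes exactly the inputs where Python A raises IndexError: a timestamp without a
-- first stamp (t or t[0] empty) or, when there is at least one timestamp, an empty-gap row
-- with fewer than two entries (with no timestamps the gap rows are never indexed).
def Pre_place_words (timestamps : List (List (List Int))) (empty : List (List Int)) : Prop :=
  (∀ t ∈ timestamps, 1 ≤ t.length ∧ 1 ≤ (t.getD 0 []).length) ∧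
  (timestamps = [] ∨ ∀ e ∈ empty, 2 ≤ e.length)
instance (timestamps : List (List (List Int))) (empty : List (List Int)) : Decidable (Pre_place_words timestamps empty) := by unfold Pre_place_words; infer_instance
def pvWitness_place_words : List (List (List Int)) × List (List Int) := ([[[3], [10]], [[7, 9]]], [[0, 5], [1, 8]])

def Spec_place_words (timestamps : List (List (List Int))) (empty : List (List Int)) (out : List (Int × Int)) : Prop := out = place_words_alt timestamps empty
instance (timestamps : List (List (List Int))) (empty : List (List Int)) (out : List (Int × Int)) : Decidable (Spec_place_words timestamps empty out) := by unfold Spec_place_words; infer_instance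

-- ===== CLAIM (what is proved, stated in full; the proofs are below) =====
def Claim_equal_place_words : Prop := ∀ (timestamps : List (List (List Int))) (empty : List (List Int)), Dom_place_words timestamps empty → Pre_place_words timestamps empty → Spec_place_words timestamps empty (place_words timestamps empty)

-- ===== LEMMAS AND PROOFS =====

-- the per-gap value A effectively computes for a distance list
def bVal (dists : List Int) : Int × Int :=
  let m := PySem.List.minD dists (fun x => x) 99
  if m < 99 then (m, (((PySem.List.index? dists m).getD 0 : Nat) : Int)) else ((99 : Int), (1 : Int))

-- A's running strict-min-with-index over an indexed distance list
def runMin (s : Int) (p : Int × Int) (dists : List Int) : Int × Int :=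
  (PySem.List.enumerate dists s).foldl
    (fun p jd => if min p.1 jd.2 ≠ p.1 then (min p.1 jd.2, jd.1) else p) p

lemma foldl_min_min (l : List Int) (a c : Int) :
    l.foldl min (min a c) = min a (l.foldl min c) := by
  induction l generalizing c with
  | nil => rfl
  | cons x t ih => simpa [min_assoc] using ih (min c x)

lemma foldl_min_mem (d : Int) (rest : List Int) : rest.foldl min d ∈ d :: rest := by
  have h := PySem.List.min?_id_cons d rest
  exact PySem.List.min?_mem h

lemma runMin_step (s b k d : Int) (rest : List Int) :
    runMin s (b, k) (d :: rest) = runMin (s+1) (if d < b then (d, s) else (b, k)) rest := by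
  unfold runMin
  rw [PySem.List.enumerate_cons]
  simp only [List.foldl_cons]
  congr 1
  by_cases h : d < b
  · have : min b d = d := min_eq_right h.le
    simp [this, h, ne_of_lt h]
  · have : min b d = b := min_eq_left (by omega)
    simp [this, h]

-- characterisation of A's running strict min: final best = list minimum (capped by b),
-- final index = first position attaining it
lemma runMin_cons (d : Int) (rest : List Int) (s b k : Int) :
    runMin s (b, k) (d :: rest) =
      (if rest.foldl min d < b then
        (rest.foldl min d, s + (((PySem.List.index? (d :: rest) (rest.foldl min d)).getD 0 : Nat) : Int))
       else (b, k)) := by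
  induction rest generalizing d s b k with
  | nil =>
    rw [runMin_step]
    by_cases h : d < b
    · simp [runMin, h]
    · simp [runMin, h]
  | cons e rest ih =>
    rw [runMin_step]
    have hmm : (e :: rest).foldl min d = min d (rest.foldl min e) := by
      simpa using foldl_min_min rest d e
    set m' := rest.foldl min e with hm'
    have hmem : m' ∈ e :: rest := foldl_min_mem e rest
    have hidx : ∃ i : Nat, PySem.List.index? (e :: rest) m' = some i :=
      Option.isSome_iff_exists.mp (by rw [PySem.List.index?_isSome_iff]; exact hmem)
    obtain ⟨i, hi⟩ := hidx
    by_cases h : d < b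
    · rw [if_pos h, ih]
      by_cases h2 : m' < d
      · have hne : d ≠ m' := by omega
        rw [if_pos h2, hmm, min_eq_right h2.le, if_pos (by omega),
            PySem.List.index?_cons_of_ne _ hne, hi]
        simp
        omega
      · rw [if_neg h2, hmm, min_eq_left (by omega), if_pos h, PySem.List.index?_cons_self]
        simp
    · rw [if_neg h, ih]
      by_cases h2 : m' < b
      · have hne : d ≠ m' := by omega
        rw [if_pos h2, hmm, min_eq_right (by omega), if_pos h2,
            PySem.List.index?_cons_of_ne _ hne, hi]
        simp
        omega
      · rw [if_neg h2, hmm]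
        rw [if_neg (by omega)]

lemma runMin_eq_bVal (dists : List Int) : runMin 0 (99, 1) dists = bVal dists := by
  cases dists with
  | nil => simp [runMin, bVal, PySem.List.minD, PySem.List.min?]
  | cons d rest =>
    rw [runMin_cons, bVal]
    simp only [PySem.List.minD, PySem.List.min?_id_cons, Option.getD_some]
    split_ifs with h
    · simp
    · rfl

-- extracting the single-cell update of A's inner loop
lemma inner_set (dval : Int → Int) (js : List Int) (c : List (Int × Int)) (k : Nat)
    (hk : k < c.length) :
    js.foldl (fun c j =>
        if min (c.getD k ((99:Int),(1:Int))).1 (dval j) ≠ (c.getD k ((99:Int),(1:Int))).1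
        then c.set k (min (c.getD k ((99:Int),(1:Int))).1 (dval j), j) else c) c
    = c.set k (js.foldl (fun p j => if min p.1 (dval j) ≠ p.1 then (min p.1 (dval j), j) else p)
        (c.getD k ((99 : Int), (1 : Int)))) := by
  induction js generalizing c with
  | nil =>
    simp only [List.foldl_nil]
    rw [List.getD_eq_getElem c _ hk, List.set_getElem_self]
  | cons j js ih =>
    simp only [List.foldl_cons]
    by_cases h : min (c.getD k ((99:Int),(1:Int))).1 (dval j) ≠ (c.getD k ((99:Int),(1:Int))).1
    · rw [if_pos h, if_pos h, ih _ (by simpa using hk), List.set_set]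
      have hs : (c.set k (min (c.getD k ((99:Int),(1:Int))).1 (dval j), j)).getD k ((99:Int),(1:Int))
          = (min (c.getD k ((99:Int),(1:Int))).1 (dval j), j) := by
        rw [List.getD_eq_getElem _ _ (by simpa using hk)]
        exact List.getElem_set_self (by simpa using hk)
      rw [hs]
    · rw [if_neg h, if_neg h, ih _ hk]

-- A's inner j-range loop over starts is the running min over the distance list
lemma inner_range_eq_runMin (starts : List Int) (q : Int) (p0 : Int × Int) :
    (PySem.List.pyRange 0 (PySem.List.len starts) 1).foldl
      (fun p j => if min p.1 |PySem.List.pyGetD starts j 0 - q| ≠ p.1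
                  then (min p.1 |PySem.List.pyGetD starts j 0 - q|, j) else p) p0
    = runMin 0 p0 (starts.map (fun s => |s - q|)) := by
  unfold runMin
  rw [PySem.List.enumerate_eq_map_pyRange _ (0 : Int), List.foldl_map]
  simp only [PySem.List.len_eq, List.length_map]
  apply PySem.List.foldl_congr_mem
  intro acc j hj
  have hj' := (PySem.List.mem_pyRange_one).mp hj
  have h1 : PySem.List.pyGetD (starts.map (fun s => |s - q|)) j 0 = |PySem.List.pyGetD starts j 0 - q| := by
    rw [PySem.List.pyGetD_eq_getElem _ _ hj'.1 (by simpa using hj'.2),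
        PySem.List.pyGetD_eq_getElem _ _ hj'.1 (by simpa using hj'.2)]
    simp
  rw [h1]

lemma outer_spec (starts : List Int) (q : Nat → Int) (n m : Nat) (h : n ≤ m) :
    (List.range n).foldl
      (fun c (k : Nat) =>
        (PySem.List.pyRange 0 (PySem.List.len starts) 1).foldl
          (fun c2 j =>
            let cur := PySem.List.pyGetD c2 (k : Int) ((99 : Int), (1 : Int))
            if min cur.1 |PySem.List.pyGetD starts j 0 - q k| ≠ cur.1
            then PySem.List.pySetD c2 (k : Int) (min cur.1 |PySem.List.pyGetD starts j 0 - q k|, j)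
            else c2) c)
      (List.replicate m ((99 : Int), (1 : Int)))
    = (List.range n).map (fun k => bVal (starts.map (fun s => |s - q k|)))
      ++ List.replicate (m - n) ((99 : Int), (1 : Int)) := by
  induction n with
  | zero => simp
  | succ n ih =>
    rw [List.range_succ, List.foldl_append, ih (by omega), List.foldl_cons, List.foldl_nil]
    simp only [PySem.List.pyGetD_natCast, PySem.List.pySetD_natCast]
    set L := (List.range n).map (fun k => bVal (starts.map (fun s => |s - q k|)))
      ++ List.replicate (m - n) ((99:Int),(1:Int)) with hL
    have hlenmap : ((List.range n).map (fun k => bVal (starts.map (fun s => |s - q k|)))).length = n := by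
      simp
    have hlen : L.length = m := by
      simp [hL]; omega
    rw [inner_set (fun j => |PySem.List.pyGetD starts j 0 - q n|) _ L n (by omega)]
    have hstart : L.getD n ((99:Int),(1:Int)) = ((99:Int),(1:Int)) := by
      rw [hL, List.getD_eq_getElem _ _ (by simp; omega),
        List.getElem_append_right (by simp)]
      simp
    rw [hstart, inner_range_eq_runMin starts (q n) _, runMin_eq_bVal]
    have hmn : m - n = (m - (n + 1)) + 1 := by omega
    rw [hL, hmn, List.replicate_succ, List.set_append_right _ _ (by omega), hlenmap]
    simp

-- A as a per-gap map of bVal over the distance lists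
lemma A_eq_map_bVal (timestamps : List (List (List Int))) (empty : List (List Int)) :
    place_words timestamps empty
    = empty.map (fun gap =>
        bVal ((timestamps.map (fun t => PySem.List.pyGetD (PySem.List.pyGetD t 0 []) 0 0)).map
          (fun s => |s - PySem.List.pyGetD gap 1 0|))) := by
  unfold place_words
  set starts := timestamps.map (fun t => PySem.List.pyGetD (PySem.List.pyGetD t 0 []) 0 0) with hs
  rw [PySem.List.len_eq empty, PySem.List.pyRange_zero_nat, List.foldl_map]
  rw [outer_spec starts (fun k => PySem.List.pyGetD (PySem.List.pyGetD empty (k : Int) []) 1 0)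
        empty.length empty.length le_rfl]
  simp only [Nat.sub_self, List.replicate_zero, List.append_nil]
  apply List.ext_getElem (by simp)
  intro k h1 h2
  simp only [List.getElem_map, List.getElem_range]
  have hk : k < empty.length := by simpa using h2
  have : PySem.List.pyGetD empty (k : Int) [] = empty[k] := by
    rw [PySem.List.pyGetD_natCast, List.getD_eq_getElem _ _ hk]
  rw [this]

-- ========== B-side lemmas ==========

-- the dict-building fold, abstracted over (index, value) pairs
def buildF (ps : List (Int × Int)) (d : PySem.Dict Int Int) : PySem.Dict Int Int :=
  ps.foldl (fun d p => if d.contains p.2 then d else d.insert p.2 p.1) d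

lemma buildF_get? (ps : List (Int × Int)) (d : PySem.Dict Int Int) (v : Int) :
    (buildF ps d).get? v = (d.get? v).or ((ps.find? (fun p => p.2 == v)).map (·.1)) := by
  induction ps generalizing d with
  | nil => simp [buildF]
  | cons p ps ih =>
    have hstep : buildF (p :: ps) d
        = buildF ps (if d.contains p.2 then d else d.insert p.2 p.1) := rfl
    rw [hstep]
    by_cases hc : d.contains p.2 = true
    · rw [if_pos hc, ih]
      by_cases hv : p.2 = v
      · subst hv
        obtain ⟨w, hw⟩ : ∃ w, d.get? p.2 = some w := by
          rcases h : d.get? p.2 with _ | w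
          · rw [PySem.Dict.get?_eq_none_iff_contains] at h; rw [hc] at h; cases h
          · exact ⟨w, rfl⟩
        simp [hw]
      · simp [beq_iff_eq, hv]
    · rw [if_neg hc]
      rw [ih]
      by_cases hv : p.2 = v
      · subst hv
        have h1 : (d.insert p.2 p.1).get? p.2 = some p.1 := PySem.Dict.get?_insert_self d p.2 p.1
        have h2 : d.get? p.2 = none := by
          rw [PySem.Dict.get?_eq_none_iff_contains]
          simpa using hc
        simp [h1, h2]
      · have h1 : (d.insert p.2 p.1).get? v = d.get? v :=
          PySem.Dict.get?_insert_of_ne d p.1 (fun h => hv (Eq.symm h))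
        simp [h1, beq_iff_eq, hv]

lemma buildF_keys (ps : List (Int × Int)) (d : PySem.Dict Int Int) (h : d.keys.Nodup) :
    (buildF ps d).keys = PySem.Set.update d.keys (ps.map (·.2)) := by
  rw [PySem.Set.update_map_eq_foldl_add]
  induction ps generalizing d with
  | nil => simp [buildF]
  | cons p ps ih =>
    have hstep : buildF (p :: ps) d
        = buildF ps (if d.contains p.2 then d else d.insert p.2 p.1) := rfl
    rw [hstep]
    simp only [List.foldl_cons]
    by_cases hc : d.contains p.2 = true
    · rw [if_pos hc, ih d h]
      have hmem : p.2 ∈ d.keys := (PySem.Dict.contains_iff_mem_keys d p.2).mp hc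
      rw [PySem.Set.add_of_mem hmem]
    · rw [if_neg hc]
      have hmem : p.2 ∉ d.keys := fun hm => hc ((PySem.Dict.contains_iff_mem_keys d p.2).mpr hm)
      have hk : (d.insert p.2 p.1).keys = d.keys ++ [p.2] :=
        PySem.Dict.keys_insert_of_not_contains d p.1 (by simpa using hc)
      rw [ih _ (by rw [hk]; exact (List.nodup_append).mpr ⟨h, List.nodup_singleton _,
            by intro a ha b hb he; simp at hb; subst hb; exact hmem (he ▸ ha)⟩), hk, PySem.Set.add_of_not_mem hmem]

lemma find?_enumerate (xs : List Int) (v : Int) (s : Int) :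
    (PySem.List.enumerate xs s).find? (fun p => p.2 == v)
    = (PySem.List.index? xs v).map (fun k => (s + (k : Int), v)) := by
  induction xs generalizing s with
  | nil => simp [PySem.List.enumerate_nil, PySem.List.index?_eq_idxOf?]
  | cons x xs ih =>
    rw [PySem.List.enumerate_cons, List.find?_cons]
    by_cases hv : x = v
    · subst hv
      rw [PySem.List.index?_cons_self]
      simp
    · have : ((s, x).2 == v) = false := by simpa using hv
      rw [this, PySem.List.index?_cons_of_ne _ hv]
      simp only []
      rw [ih (s + 1)]
      cases h : PySem.List.index? xs v with
      | none => simp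
      | some k =>
        simp only [Option.map_some]
        simp
        ring

lemma enumerate_map {α β : Type} (f : α → β) (xs : List α) (s : Int) :
    PySem.List.enumerate (xs.map f) s = (PySem.List.enumerate xs s).map (fun p => (p.1, f p.2)) := by
  induction xs generalizing s with
  | nil => simp [PySem.List.enumerate_nil]
  | cons x xs ih => rw [List.map_cons, PySem.List.enumerate_cons, PySem.List.enumerate_cons, ih,
      List.map_cons]

lemma bsearch_stop (vals : List Int) (q : Int) (lo hi : Nat) (h : ¬ lo < hi) :
    bsearch vals q lo hi = lo := by
  rw [bsearch]; simp [h]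

lemma bsearch_go (vals : List Int) (q : Int) (lo hi : Nat) (h : lo < hi) :
    bsearch vals q lo hi =
      if PySem.List.pyGetD vals ((((lo + hi) / 2 : Nat)) : Int) 0 < q
      then bsearch vals q ((lo + hi) / 2 + 1) hi
      else bsearch vals q lo ((lo + hi) / 2) := by
  rw [bsearch]; simp [h]

lemma bsearch_spec_aux (vals : List Int) (q : Int) (hp : vals.Pairwise (· < ·)) :
    ∀ (fuel lo hi : Nat), hi - lo ≤ fuel → lo ≤ hi → hi ≤ vals.length →
    lo ≤ bsearch vals q lo hi ∧ bsearch vals q lo hi ≤ hi ∧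
    (∀ i (h : i < vals.length), lo ≤ i → i < bsearch vals q lo hi → vals[i] < q) ∧
    (∀ i (h : i < vals.length), bsearch vals q lo hi ≤ i → i < hi → q ≤ vals[i]) := by
  have hmono : ∀ (i j : Nat) (hi : i < vals.length) (hj : j < vals.length), i < j → vals[i] < vals[j] :=
    fun i j hi hj hij => List.pairwise_iff_getElem.mp hp i j hi hj hij
  intro fuel
  induction fuel with
  | zero =>
    intro lo hi h1 h2 h3
    have hnl : ¬ lo < hi := by omega
    rw [bsearch_stop vals q lo hi hnl]
    exact ⟨le_rfl, h2, fun i h hl hr => by omega, fun i h hl hr => by omega⟩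
  | succ fuel ih =>
    intro lo hi h1 h2 h3
    by_cases hlt : lo < hi
    · rw [bsearch_go vals q lo hi hlt]
      have hmlt : (lo + hi) / 2 < vals.length := by omega
      rw [PySem.List.pyGetD_natCast, List.getD_eq_getElem _ _ hmlt]
      by_cases hcmp : vals[(lo + hi) / 2] < q
      · rw [if_pos hcmp]
        obtain ⟨ih1, ih2, ih3, ih4⟩ := ih ((lo + hi) / 2 + 1) hi (by omega) (by omega) h3
        refine ⟨by omega, ih2, ?_, ih4⟩
        intro i h hl hr
        by_cases hi2 : i < (lo + hi) / 2
        · exact lt_trans (hmono i _ h hmlt hi2) hcmp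
        · by_cases hi3 : i = (lo + hi) / 2
          · subst hi3; exact hcmp
          · exact ih3 i h (by omega) hr
      · rw [if_neg hcmp]
        push Not at hcmp
        obtain ⟨ih1, ih2, ih3, ih4⟩ := ih lo ((lo + hi) / 2) (by omega) (by omega) (by omega)
        refine ⟨ih1, by omega, ih3, ?_⟩
        intro i h hl hr
        by_cases hi2 : i < (lo + hi) / 2
        · exact ih4 i h hl hi2
        · by_cases hi3 : i = (lo + hi) / 2
          · subst hi3; exact hcmp
          · exact le_of_lt (lt_of_le_of_lt hcmp (hmono _ i hmlt h (by omega)))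
    · rw [bsearch_stop vals q lo hi hlt]
      exact ⟨le_rfl, h2, fun i h hl hr => by omega, fun i h hl hr => by omega⟩

lemma bsearch_spec (vals : List Int) (q : Int) (hp : vals.Pairwise (· < ·))
    (lo hi : Nat) (hlohi : lo ≤ hi) (hhi : hi ≤ vals.length) :
    lo ≤ bsearch vals q lo hi ∧ bsearch vals q lo hi ≤ hi ∧
    (∀ i (h : i < vals.length), lo ≤ i → i < bsearch vals q lo hi → vals[i] < q) ∧
    (∀ i (h : i < vals.length), bsearch vals q lo hi ≤ i → i < hi → q ≤ vals[i]) :=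
  bsearch_spec_aux vals q hp (hi - lo) lo hi le_rfl hlohi hhi

lemma index?_eq_some_of (xs : List Int) (v : Int) (i0 : Nat) (h1 : i0 < xs.length)
    (h2 : xs[i0] = v) (h3 : ∀ j (hj : j < i0), xs[j] ≠ v) :
    PySem.List.index? xs v = some i0 := by
  rw [PySem.List.index?_eq_some_iff]
  refine ⟨xs.take i0, xs.drop (i0 + 1), ?_, by simp [Nat.min_eq_left h1.le], ?_⟩
  · conv_lhs => rw [← List.take_append_drop i0 xs]
    rw [← List.getElem_cons_drop h1, h2]
  · intro hmem
    obtain ⟨j, hj, hj2⟩ := List.mem_take_iff_getElem.mp hmem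
    exact h3 j (by omega) (by simpa using hj2)

lemma bVal_of_dominates (dists : List Int) (d0 : Int) (i0 : Nat) (hi0 : i0 < dists.length)
    (hval : dists[i0] = d0)
    (hdom : ∀ j (hj : j < dists.length), d0 < dists[j] ∨ (d0 = dists[j] ∧ i0 ≤ j)) :
    bVal dists = if d0 < 99 then (d0, (i0 : Int)) else ((99 : Int), (1 : Int)) := by
  cases dists with
  | nil => simp at hi0
  | cons d1 rest =>
    have hminD : PySem.List.minD (d1 :: rest) (fun x => x) 99 = rest.foldl min d1 := by
      simp [PySem.List.minD, PySem.List.min?_id_cons]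
    set m := rest.foldl min d1 with hm
    have hmem : m ∈ d1 :: rest := foldl_min_mem d1 rest
    have hisMin : ∀ y ∈ d1 :: rest, m ≤ y := fun y hy =>
      PySem.List.min?_isMin (key := fun x => x) (PySem.List.min?_id_cons d1 rest) y hy
    have h1 : m ≤ d0 := hval ▸ hisMin _ (List.getElem_mem hi0)
    have h2 : d0 ≤ m := by
      obtain ⟨j, hj, hjv⟩ := List.mem_iff_getElem.mp hmem
      rcases hdom j hj with h | h
      · omega
      · omega
    have hmd : m = d0 := le_antisymm h1 h2
    rw [bVal, hminD, hmd]
    by_cases hlt : d0 < 99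
    · rw [if_pos hlt, if_pos hlt]
      have hidx : PySem.List.index? (d1 :: rest) d0 = some i0 := by
        apply index?_eq_some_of _ _ _ hi0 hval
        intro j hj hne
        rcases hdom j (by omega) with h | h
        · omega
        · omega
      rw [hidx]
      simp
    · rw [if_neg hlt, if_neg hlt]

lemma bestFor_eq_bVal (vals : List Int) (first : PySem.Dict Int Int) (starts : List Int) (q : Int)
    (hvals : vals = PySem.List.sorted (PySem.Set.ofList starts) (fun x => x) false)
    (hget : ∀ v k, PySem.List.index? starts v = some k → first.getD v 0 = (k : Int))
    (hne : starts ≠ []) :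
    bestFor vals first q = bVal (starts.map (fun s => |s - q|)) := by
  have hpair : vals.Pairwise (· < ·) := by
    rw [hvals]; exact PySem.List.sorted_ofList_pairwise_lt starts
  have hmemv : ∀ v, v ∈ vals ↔ v ∈ starts := fun v => by
    rw [hvals, PySem.List.mem_sorted, PySem.Set.mem_ofList]
  have hmono : ∀ (i j : Nat) (hi : i < vals.length) (hj : j < vals.length), i < j → vals[i] < vals[j] :=
    fun i j hi hj hij => List.pairwise_iff_getElem.mp hpair i j hi hj hij
  have hmonole : ∀ (i j : Nat) (hi : i < vals.length) (hj : j < vals.length), i ≤ j → vals[i] ≤ vals[j] := by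
    intro i j hi hj hij
    rcases Nat.lt_or_ge i j with h | h
    · exact le_of_lt (hmono i j hi hj h)
    · have : i = j := by omega
      subst this; exact le_rfl
  have hn1 : 1 ≤ vals.length := by
    cases hs : starts with
    | nil => exact absurd hs hne
    | cons s0 t =>
      have hm : s0 ∈ vals := (hmemv s0).mpr (by rw [hs]; exact List.mem_cons_self)
      cases hv : vals with
      | nil => rw [hv] at hm; simp at hm
      | cons _ _ => simp
  obtain ⟨hlo0, hloN, hbelow, habove⟩ := bsearch_spec vals q hpair 0 vals.length (by omega) le_rfl
  have hpos : ∀ (j : Nat) (hj : j < starts.length), ∃ (p : Nat) (hp : p < vals.length), vals[p] = starts[j] := by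
    intro j hj
    have : starts[j] ∈ vals := (hmemv _).mpr (List.getElem_mem hj)
    obtain ⟨p, hp, hpv⟩ := List.mem_iff_getElem.mp this
    exact ⟨p, hp, hpv⟩
  have hidxv : ∀ (p : Nat) (hp : p < vals.length), ∃ (k : Nat) (hk : k < starts.length),
      PySem.List.index? starts (vals[p]'hp) = some k ∧ starts[k]'hk = vals[p]'hp ∧
      ∀ (j : Nat) (hj : j < starts.length), starts[j]'hj = vals[p]'hp → k ≤ j := by
    intro p hp
    have hmem2 : vals[p]'hp ∈ starts := (hmemv _).mp (List.getElem_mem hp)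
    have hks : ∃ k : Nat, PySem.List.index? starts (vals[p]'hp) = some k :=
      Option.isSome_iff_exists.mp (by rw [PySem.List.index?_isSome_iff]; exact hmem2)
    obtain ⟨k, hk⟩ := hks
    obtain ⟨hklt, hkv, hkfirst⟩ := PySem.List.getElem_of_index?_eq_some hk
    refine ⟨k, hklt, hk, hkv, ?_⟩
    intro j hj hjv
    by_contra hcon
    exact hkfirst j (by omega) hjv
  -- which side of q each start lies on, in terms of lo
  have hsideR : ∀ (j : Nat) (hj : j < starts.length), q ≤ starts[j]'hj →
      ∃ hL : bsearch vals q 0 vals.length < vals.length, vals[bsearch vals q 0 vals.length] ≤ starts[j]'hj := by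
    intro j hj hq
    obtain ⟨p, hp, hpv⟩ := hpos j hj
    have hple : bsearch vals q 0 vals.length ≤ p := by
      by_contra hcon
      have := hbelow p hp (by omega) (by omega)
      omega
    exact ⟨by omega, hpv ▸ hmonole _ p (by omega) hp hple⟩
  have hsideL : ∀ (j : Nat) (hj : j < starts.length), starts[j]'hj < q →
      0 < bsearch vals q 0 vals.length ∧
      ∀ (h2 : bsearch vals q 0 vals.length - 1 < vals.length),
        starts[j]'hj ≤ vals[bsearch vals q 0 vals.length - 1] := by
    intro j hj hq
    obtain ⟨p, hp, hpv⟩ := hpos j hj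
    have hplt : p < bsearch vals q 0 vals.length := by
      by_contra hcon
      have := habove p hp (by omega) hp
      omega
    exact ⟨by omega, fun h2 => hpv ▸ hmonole p _ hp h2 (by omega)⟩
  unfold bestFor
  simp only []
  set lo := bsearch vals q 0 vals.length with hlodef
  by_cases hc1 : lo < vals.length
  · -- right candidate exists
    obtain ⟨kR, hkRlt, hkRidx, hkRval, hkRfirst⟩ := hidxv lo hc1
    have hqR : q ≤ vals[lo] := habove lo hc1 (by omega) hc1
    have hgR : PySem.List.pyGetD vals (lo : Int) 0 = vals[lo] := by
      rw [PySem.List.pyGetD_natCast, List.getD_eq_getElem _ _ hc1]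
    rw [if_pos hc1, hgR, hget _ kR hkRidx]
    have hdistR : (starts.map (fun s => |s - q|))[kR]'(by simpa using hkRlt) = vals[lo] - q := by
      simp only [List.getElem_map]
      rw [hkRval, abs_of_nonneg (show (0:Int) ≤ vals[lo] - q by omega)]
    have hdomR : ∀ (j : Nat) (hj : j < starts.length), q ≤ starts[j]'hj →
        vals[lo] - q < |starts[j]'hj - q| ∨ (vals[lo] - q = |starts[j]'hj - q| ∧ kR ≤ j) := by
      intro j hj hq2
      obtain ⟨_, hle⟩ := hsideR j hj hq2
      rw [abs_of_nonneg (show (0:Int) ≤ starts[j]'hj - q by omega)]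
      rcases lt_or_eq_of_le hle with h | h
      · left; omega
      · right; exact ⟨by omega, hkRfirst j hj (by omega)⟩
    by_cases hc0 : 0 < lo
    · -- both candidates
      have hc1' : lo - 1 < vals.length := by omega
      obtain ⟨kL, hkLlt, hkLidx, hkLval, hkLfirst⟩ := hidxv (lo - 1) hc1'
      have hqL : vals[lo - 1] < q := hbelow (lo - 1) hc1' (by omega) (by omega)
      have hgL : PySem.List.pyGetD vals ((lo : Int) - 1) 0 = vals[lo - 1] := by
        have hcast : (lo : Int) - 1 = ((lo - 1 : Nat) : Int) := by omega
        rw [hcast, PySem.List.pyGetD_natCast, List.getD_eq_getElem _ _ hc1']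
      rw [if_pos hc0, hgL, hget _ kL hkLidx]
      have hdistL : (starts.map (fun s => |s - q|))[kL]'(by simpa using hkLlt) = q - vals[lo - 1] := by
        simp only [List.getElem_map]
        rw [hkLval, abs_of_nonpos (show vals[lo - 1] - q ≤ 0 by omega)]
        ring
      -- the generic dominance facts, one per side
      have hdomL : ∀ (j : Nat) (hj : j < starts.length), starts[j]'hj < q →
          q - vals[lo - 1] < |starts[j]'hj - q| ∨ (q - vals[lo - 1] = |starts[j]'hj - q| ∧ kL ≤ j) := by
        intro j hj hq2
        obtain ⟨_, hle⟩ := hsideL j hj hq2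
        have hle2 := hle hc1'
        rw [abs_of_nonpos (show starts[j]'hj - q ≤ 0 by omega)]
        rcases lt_or_eq_of_le hle2 with h | h
        · left; omega
        · right; exact ⟨by omega, hkLfirst j hj (by omega)⟩
      by_cases hsel : q - vals[lo - 1] < vals[lo] - q ∨
          (q - vals[lo - 1] = vals[lo] - q ∧ (kL : Int) < (kR : Int))
      · simp only []
        rw [if_pos hsel]
        rw [bVal_of_dominates (starts.map (fun s => |s - q|)) (q - vals[lo - 1]) kL
            (by simpa using hkLlt) hdistL ?_]
        intro j hj
        have hj' : j < starts.length := by simpa using hj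
        simp only [List.getElem_map]
        by_cases hside : starts[j]'hj' < q
        · exact hdomL j hj' hside
        · rcases hdomR j hj' (by omega) with h | h
          · left; rcases hsel with h2 | h2 <;> omega
          · rcases hsel with h2 | h2
            · left; omega
            · right
              refine ⟨by omega, ?_⟩
              have : kL < kR := by exact_mod_cast h2.2
              omega
      · simp only []
        rw [if_neg hsel]
        push Not at hsel
        rw [bVal_of_dominates (starts.map (fun s => |s - q|)) (vals[lo] - q) kR
            (by simpa using hkRlt) hdistR ?_]
        intro j hj
        have hj' : j < starts.length := by simpa using hj
        simp only [List.getElem_map]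
        by_cases hside : starts[j]'hj' < q
        · rcases hdomL j hj' hside with h | h
          · left; omega
          · rcases lt_or_eq_of_le hsel.1 with h2 | h2
            · left; omega
            · right
              refine ⟨by omega, ?_⟩
              have hkk : (kR : Int) ≤ (kL : Int) := hsel.2 (by omega)
              have : kR ≤ kL := by exact_mod_cast hkk
              omega
        · exact hdomR j hj' (by omega)
    · -- lo = 0 : only the right candidate
      rw [if_neg hc0]
      rw [bVal_of_dominates (starts.map (fun s => |s - q|)) (vals[lo] - q) kR
          (by simpa using hkRlt) hdistR ?_]
      intro j hj
      have hj' : j < starts.length := by simpa using hj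
      simp only [List.getElem_map]
      have hside : q ≤ starts[j]'hj' := by
        by_contra hcon
        have := (hsideL j hj' (by omega)).1
        omega
      exact hdomR j hj' hside
  · -- lo = vals.length : only the left candidate
    have hc0 : 0 < lo := by omega
    have hc1' : lo - 1 < vals.length := by omega
    obtain ⟨kL, hkLlt, hkLidx, hkLval, hkLfirst⟩ := hidxv (lo - 1) hc1'
    have hqL : vals[lo - 1] < q := hbelow (lo - 1) hc1' (by omega) (by omega)
    have hgL : PySem.List.pyGetD vals ((lo : Int) - 1) 0 = vals[lo - 1] := by
      have hcast : (lo : Int) - 1 = ((lo - 1 : Nat) : Int) := by omega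
      rw [hcast, PySem.List.pyGetD_natCast, List.getD_eq_getElem _ _ hc1']
    rw [if_neg hc1, if_pos hc0, hgL, hget _ kL hkLidx]
    have hdistL : (starts.map (fun s => |s - q|))[kL]'(by simpa using hkLlt) = q - vals[lo - 1] := by
      simp only [List.getElem_map]
      rw [hkLval, abs_of_nonpos (show vals[lo - 1] - q ≤ 0 by omega)]
      ring
    rw [bVal_of_dominates (starts.map (fun s => |s - q|)) (q - vals[lo - 1]) kL
        (by simpa using hkLlt) hdistL ?_]
    intro j hj
    have hj' : j < starts.length := by simpa using hj
    simp only [List.getElem_map]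
    have hside : starts[j]'hj' < q := by
      by_contra hcon
      obtain ⟨hL, _⟩ := hsideR j hj' (by omega)
      omega
    obtain ⟨_, hle⟩ := hsideL j hj' hside
    have hle2 := hle hc1'
    rw [abs_of_nonpos (show starts[j]'hj' - q ≤ 0 by omega)]
    rcases lt_or_eq_of_le hle2 with h | h
    · left; omega
    · right; exact ⟨by omega, hkLfirst j hj' (by omega)⟩

lemma ports_agree (timestamps : List (List (List Int))) (empty : List (List Int)) :
    place_words timestamps empty = place_words_alt timestamps empty := by
  rw [A_eq_map_bVal]
  unfold place_words_alt
  simp only []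
  set starts := timestamps.map (fun t => PySem.List.pyGetD (PySem.List.pyGetD t 0 []) 0 0) with hs
  have hfold : (PySem.List.pyRange 0 (PySem.List.len timestamps) 1).foldl
      (fun d j =>
        let s := PySem.List.pyGetD (PySem.List.pyGetD (PySem.List.pyGetD timestamps j []) 0 []) 0 0
        if d.contains s then d else d.insert s j)
      PySem.Dict.empty
      = buildF (PySem.List.enumerate starts 0) PySem.Dict.empty := by
    unfold buildF
    rw [hs, enumerate_map, PySem.List.enumerate_eq_map_pyRange timestamps ([] : List (List Int)),
        List.foldl_map, List.foldl_map]
  rw [hfold]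
  set first := buildF (PySem.List.enumerate starts 0) PySem.Dict.empty with hfirst
  have hkeys : first.keys = PySem.Set.ofList starts := by
    rw [hfirst, buildF_keys _ _ (by rw [PySem.Dict.keys_empty]; exact List.nodup_nil),
        PySem.Dict.keys_empty, PySem.Set.update_nil_left]
    congr 1
    exact PySem.List.map_snd_enumerate starts 0
  have hget : ∀ v k, PySem.List.index? starts v = some k → first.getD v 0 = (k : Int) := by
    intro v k hk
    rw [hfirst, PySem.Dict.getD_eq_get?_getD, buildF_get?, PySem.Dict.get?_empty,
        find?_enumerate, hk]
    simp
  by_cases hemp : (PySem.List.sorted first.keys (fun x => x) false).isEmpty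
  · have hstarts : starts = [] := by
      have hveq : PySem.List.sorted first.keys (fun x => x) false = [] := List.isEmpty_iff.mp hemp
      cases hsc : starts with
      | nil => rfl
      | cons s0 t =>
        exfalso
        have hm : s0 ∈ PySem.List.sorted first.keys (fun x => x) false := by
          rw [PySem.List.mem_sorted, hkeys, PySem.Set.mem_ofList, hsc]
          exact List.mem_cons_self
        rw [hveq] at hm
        simp at hm
    rw [if_pos hemp, hstarts]
    simp [bVal, PySem.List.minD, PySem.List.min?, List.map_const']
  · rw [if_neg hemp]
    have hne : starts ≠ [] := by
      intro hsc
      apply hemp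
      rw [List.isEmpty_iff]
      have : ∀ x, x ∉ PySem.List.sorted first.keys (fun x => x) false := by
        intro x hx
        rw [PySem.List.mem_sorted, hkeys, PySem.Set.mem_ofList, hsc] at hx
        simp at hx
      cases h : PySem.List.sorted first.keys (fun x => x) false with
      | nil => rfl
      | cons a t => exact absurd (h ▸ List.mem_cons_self) (this a)
    apply List.map_congr_left
    intro gap hgap
    rw [bestFor_eq_bVal (PySem.List.sorted first.keys (fun x => x) false) first starts
        (PySem.List.pyGetD gap 1 0) (by rw [hkeys]) hget hne]

-- ===== VERDICT (by name: the statement is the Claim_ definition above) =====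
theorem place_words_spec : Claim_equal_place_words := by
  intro timestamps empty _ _
  exact ports_agree timestamps empty
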